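-- pv_equiv track=rewrite | github.com/kim-em/hex | scripts/bench/external/python_arith.py | run_a3
-- ===== SOURCE A (Python) =====
-- _MASK = (1 << 64) - 1
--
-- def splitmix64_next(state: int) -> tuple[int, int]:
--     state = (state + 0x9E3779B97F4A7C15) & _MASK
--     z = state
--     z = ((z ^ (z >> 30)) * 0xBF58476D1CE4E5B9) & _MASK
--     z = ((z ^ (z >> 27)) * 0x94D049BB133111EB) & _MASK
--     z = z ^ (z >> 31)
--     return z, state
--
-- def next_range(state: int, n: int) -> tuple[int, int]:
--     z, state = splitmix64_next(state)
--     return z % n, state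
--
-- A3_MOD = 4294967291  # Barrett
--
-- def run_a3(seed: int, n: int) -> int:
--     a0, s1 = next_range(seed, A3_MOD)
--     b0, _ = next_range(s1, A3_MOD)
--     x = a0
--     y = b0
--     for _ in range(n):
--         x = (x * y) % A3_MOD
--     return x & _MASK
-- ===== SOURCE B (Python) =====
-- A3_MOD = 4294967291
-- _M64 = (1 << 64) - 1
--
-- def _mix(z, shift, mult):
--     return ((z ^ (z >> shift)) * mult) & _M64
--
-- def _draws(seed, count):
--     # first `count` splitmix64 outputs from `seed`, each reduced mod A3_MOD
--     out = []
--     s = seed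
--     for _ in range(count):
--         s = (s + 0x9E3779B97F4A7C15) & _M64
--         z = _mix(s, 30, 0xBF58476D1CE4E5B9)
--         z = _mix(z, 27, 0x94D049BB133111EB)
--         out.append((z ^ (z >> 31)) % A3_MOD)
--     return out
--
-- def run_a3(seed, n):
--     a0, b0 = _draws(seed, 2)
--     # x after k loop steps is a0 * b0**k mod A3_MOD; square-and-multiply
--     r = a0
--     base = b0
--     e = max(n, 0)
--     while e > 0:
--         if e & 1:
--             r = r * base % A3_MOD
--         base = base * base % A3_MOD
--         e >>= 1
--     return r
-- ===== Notes on version B (the rewrite author's own statement) =====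
-- stated objective: faster
-- what changed: Generates the two PRNG draws via a list-building generator helper and replaces A's n-step loop of modular multiplications by hand-written binary square-and-multiply exponentiation.
import Mathlib
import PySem

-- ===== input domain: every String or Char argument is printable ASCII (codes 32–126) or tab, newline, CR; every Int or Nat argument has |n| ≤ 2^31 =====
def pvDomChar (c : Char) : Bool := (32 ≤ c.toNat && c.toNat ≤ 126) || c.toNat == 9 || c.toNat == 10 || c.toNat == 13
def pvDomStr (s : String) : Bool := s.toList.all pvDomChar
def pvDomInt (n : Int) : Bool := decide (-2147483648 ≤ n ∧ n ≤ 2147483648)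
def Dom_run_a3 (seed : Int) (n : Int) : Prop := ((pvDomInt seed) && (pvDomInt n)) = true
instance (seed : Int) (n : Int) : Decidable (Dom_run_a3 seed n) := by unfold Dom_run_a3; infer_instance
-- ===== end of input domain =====

-- B draws the two PRNG values with a list-building generator and replaces A's
-- n-step multiplication loop by binary square-and-multiply (objective: faster).

-- ===== PORT A =====
def pvMASK : Int := (1 <<< 64) - 1

def pvSplitmix64Next (state : Int) : Int × Int :=
  let state := PySem.Int.band (state + 0x9E3779B97F4A7C15) pvMASK
  let z := state
  let z := PySem.Int.band ((PySem.Int.bxor z (z >>> 30)) * 0xBF58476D1CE4E5B9) pvMASK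
  let z := PySem.Int.band ((PySem.Int.bxor z (z >>> 27)) * 0x94D049BB133111EB) pvMASK
  let z := PySem.Int.bxor z (z >>> 31)
  (z, state)

def pvNextRange (state : Int) (n : Int) : Int × Int :=
  let p := pvSplitmix64Next state
  (PySem.Int.mod p.1 n, p.2)

def pvA3MOD : Int := 4294967291

def run_a3 (seed : Int) (n : Int) : Int :=
  let a0 := (pvNextRange seed pvA3MOD).1
  let s1 := (pvNextRange seed pvA3MOD).2
  let b0 := (pvNextRange s1 pvA3MOD).1
  let x := a0
  let y := b0
  let x := (List.range n.toNat).foldl (fun x _ => PySem.Int.mod (x * y) pvA3MOD) x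
  PySem.Int.band x pvMASK

-- ===== PORT B =====
def pvMix (z : Int) (shift : Int) (mult : Int) : Int :=
  PySem.Int.band ((PySem.Int.bxor z (z >>> shift)) * mult) ((1 <<< 64) - 1)

-- Source B's _draws loop: structural recursion on `count`, producing the draws in order.
def pvDraws (s : Int) : Nat → List Int
  | 0 => []
  | count + 1 =>
    let s' := PySem.Int.band (s + 0x9E3779B97F4A7C15) ((1 <<< 64) - 1)
    let z := pvMix s' 30 0xBF58476D1CE4E5B9
    let z := pvMix z 27 0x94D049BB133111EB
    PySem.Int.mod (PySem.Int.bxor z (z >>> 31)) 4294967291 :: pvDraws s' count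

-- Source B's while loop: square-and-multiply, recursion on the (Nat) exponent.
def pvSqMul (r base : Int) (e : Nat) : Int :=
  if e = 0 then r
  else
    pvSqMul (if e &&& 1 = 1 then PySem.Int.mod (r * base) 4294967291 else r)
      (PySem.Int.mod (base * base) 4294967291) (e >>> 1)
decreasing_by simpa [Nat.shiftRight_one] using Nat.div_lt_self (Nat.pos_of_ne_zero (by assumption)) one_lt_two

def run_a3_alt (seed : Int) (n : Int) : Int :=
  match pvDraws seed 2 with
  | [a0, b0] => pvSqMul a0 b0 (max n 0).toNat
  | _ => 0   -- unreachable: pvDraws _ 2 has two elements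

-- ===== PRECONDITION & SPEC =====
def Spec_run_a3 (seed : Int) (n : Int) (out : Int) : Prop := out = run_a3_alt seed n
instance (seed : Int) (n : Int) (out : Int) : Decidable (Spec_run_a3 seed n out) := by unfold Spec_run_a3; infer_instance

-- ===== CLAIM (what is proved, stated in full; the proofs are below) =====
def Claim_equal_run_a3 : Prop := ∀ (seed : Int) (n : Int), Dom_run_a3 seed n → Spec_run_a3 seed n (run_a3 seed n)

-- ===== LEMMAS AND PROOFS =====

theorem pv_pow_mod (b M : Int) (k : Nat) : (b % M) ^ k % M = b ^ k % M :=
  Int.ModEq.pow k (Int.emod_emod_of_dvd b dvd_rfl)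

theorem pv_mod_idem (a M : Int) (hM : 0 < M) :
    PySem.Int.mod (PySem.Int.mod a M) M = PySem.Int.mod a M := by
  simp only [PySem.Int.mod_eq_emod_of_pos hM]
  exact Int.emod_emod_of_dvd _ dvd_rfl

-- A's loop computes x * y^k mod M when x is already reduced mod M.
theorem pv_loop_eq (y M : Int) (hM : 0 < M) :
    ∀ (k : Nat) (x : Int), PySem.Int.mod x M = x →
      (List.range k).foldl (fun x _ => PySem.Int.mod (x * y) M) x
        = PySem.Int.mod (x * y ^ k) M := by
  intro k
  induction k with
  | zero => intro x hx; simpa using hx.symm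
  | succ k ih =>
      intro x hx
      rw [List.range_succ, List.foldl_append, ih x hx]
      simp only [List.foldl_cons, List.foldl_nil, pow_succ,
        PySem.Int.mod_eq_emod_of_pos hM]
      rw [Int.mul_emod, Int.emod_emod_of_dvd _ dvd_rfl, ← Int.mul_emod, mul_assoc]

-- B's square-and-multiply computes r * base^e mod M when r is reduced.
theorem pv_sqmul_eq :
    ∀ (e : Nat) (r base : Int), PySem.Int.mod r 4294967291 = r →
      pvSqMul r base e = PySem.Int.mod (r * base ^ e) 4294967291 := by
  intro e
  induction e using Nat.strong_induction_on with
  | _ e ih =>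
    intro r base hr
    have hM : (0 : Int) < 4294967291 := by norm_num
    rw [pvSqMul]
    by_cases h0 : e = 0
    · subst h0; simpa using hr.symm
    · simp only [h0, if_false]
      have hlt : e >>> 1 < e := by
        simpa [Nat.shiftRight_one] using Nat.div_lt_self (Nat.pos_of_ne_zero h0) one_lt_two
      have hrec := ih (e >>> 1) hlt
      have hdecomp : e = 2 * (e >>> 1) + e % 2 := by
        simp [Nat.shiftRight_one]; omega
      by_cases hodd : e &&& 1 = 1
      · have he2 : e % 2 = 1 := by simpa [Nat.and_one_is_mod] using hodd
        have hd : e = 2 * (e >>> 1) + 1 := by rw [Nat.shiftRight_one]; omega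
        rw [if_pos hodd, hrec _ _ (pv_mod_idem _ _ hM)]
        simp only [PySem.Int.mod_eq_emod_of_pos hM]
        conv_rhs => rw [hd]
        rw [Int.mul_emod, Int.emod_emod_of_dvd _ dvd_rfl, pv_pow_mod, ← Int.mul_emod]
        congr 1; ring
      · have he2 : e % 2 = 0 := by
          have := Nat.and_one_is_mod e; omega
        have hd : e = 2 * (e >>> 1) := by rw [Nat.shiftRight_one]; omega
        rw [if_neg hodd, hrec _ _ hr]
        simp only [PySem.Int.mod_eq_emod_of_pos hM]
        conv_rhs => rw [hd]
        rw [Int.mul_emod, pv_pow_mod, ← Int.mul_emod]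
        congr 1; ring

-- x & ((1<<64)-1) = x for 0 ≤ x < 2^64.
theorem pv_band_mask (x : Int) (h0 : 0 ≤ x) (h1 : x < 18446744073709551616) :
    PySem.Int.band x pvMASK = x := by
  rw [show pvMASK = ((18446744073709551615 : Nat) : Int) from rfl,
    PySem.Int.band_of_nonneg h0 (by norm_num)]
  have hlt : x.toNat < 2 ^ 64 := by omega
  have : x.toNat &&& (18446744073709551615 : Nat) = x.toNat % 2 ^ 64 := by
    have := Nat.and_two_pow_sub_one_eq_mod x.toNat 64
    simpa using this
  rw [show ((18446744073709551615 : Nat) : Int).toNat = (18446744073709551615 : Nat) from rfl,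
    this, Nat.mod_eq_of_lt hlt]
  omega

-- B's two draws are exactly A's two next_range values.
theorem pv_draws_two (s : Int) :
    pvDraws s 2 = [(pvNextRange s pvA3MOD).1,
                   (pvNextRange (pvNextRange s pvA3MOD).2 pvA3MOD).1] := by
  simp only [pvDraws, pvMix, pvNextRange, pvSplitmix64Next, pvA3MOD, pvMASK]

-- ===== VERDICT (by name: the statement is the Claim_ definition above) =====
theorem run_a3_spec : Claim_equal_run_a3 := by
  intro seed n _
  unfold Spec_run_a3 run_a3 run_a3_alt
  rw [pv_draws_two]
  dsimp only
  have hM : (0 : Int) < pvA3MOD := by norm_num [pvA3MOD]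
  set a0 := (pvNextRange seed pvA3MOD).1 with ha0
  set b0 := (pvNextRange (pvNextRange seed pvA3MOD).2 pvA3MOD).1 with hb0
  have ha0' : PySem.Int.mod a0 pvA3MOD = a0 := by
    rw [ha0]; exact pv_mod_idem _ _ hM
  rw [pv_loop_eq b0 pvA3MOD hM n.toNat a0 ha0']
  rw [pv_band_mask _ (PySem.Int.mod_nonneg _ hM)
    (lt_trans (PySem.Int.mod_lt _ hM) (by norm_num [pvA3MOD]))]
  have hmax : (max n 0).toNat = n.toNat := by omega
  rw [pv_sqmul_eq _ _ _ (by simpa [pvA3MOD] using ha0'), hmax]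
  simp [pvA3MOD]
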